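-- pv_equiv track=rewrite | github.com/dmaizel/adventofcode | 2020/20/code5.py | image_rotations
-- ===== SOURCE A (Python) =====
-- def rotate_image(image):
--     new_image = []
--     size = len(image)
--     for row in range(size):
--         s = []
--         for column in range(size):
--             s.append(image[size - 1 - column][row])
--         new_image.append(s)
--
--     return new_image
--
-- def image_rotations(image):
--     rotations = []
--     new_image = image.copy()
--     for _ in range(2):
--         for _ in range(4):
--             rotations.append(new_image)
--             new_image = rotate_image(new_image)
--         new_image = flip_image(new_image)
--
--     return rotations
--
-- def flip_image(image):
--     return [row[::-1] for row in image]
-- ===== SOURCE B (Python) =====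
-- def image_rotations(image):
--     # Each of the 8 dihedral orientations is built directly from the original
--     # grid via a closed-form index map (no chaining of rotations/flips).
--     n = len(image)
--     maps = [
--         lambda r, c: (n - 1 - c, r),          # rot90
--         lambda r, c: (n - 1 - r, n - 1 - c),  # rot180
--         lambda r, c: (c, n - 1 - r),          # rot270
--         lambda r, c: (r, n - 1 - c),          # horizontal flip
--         lambda r, c: (n - 1 - c, n - 1 - r),  # rot90 of flip
--         lambda r, c: (n - 1 - r, c),          # rot180 of flip
--         lambda r, c: (c, r),                  # rot270 of flip = transpose
--     ]
--     out = [image.copy()]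
--     for f in maps:
--         out.append([[image[f(r, c)[0]][f(r, c)[1]] for c in range(n)]
--                     for r in range(n)])
--     return out
-- ===== Notes on version B (the rewrite author's own statement) =====
-- stated objective: alternative
-- what changed: B computes each of the 8 dihedral orientations directly from the original grid via a closed-form index map per orientation, instead of A's sequential folding that rotates/flips a running image and appends it.
import Mathlib
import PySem

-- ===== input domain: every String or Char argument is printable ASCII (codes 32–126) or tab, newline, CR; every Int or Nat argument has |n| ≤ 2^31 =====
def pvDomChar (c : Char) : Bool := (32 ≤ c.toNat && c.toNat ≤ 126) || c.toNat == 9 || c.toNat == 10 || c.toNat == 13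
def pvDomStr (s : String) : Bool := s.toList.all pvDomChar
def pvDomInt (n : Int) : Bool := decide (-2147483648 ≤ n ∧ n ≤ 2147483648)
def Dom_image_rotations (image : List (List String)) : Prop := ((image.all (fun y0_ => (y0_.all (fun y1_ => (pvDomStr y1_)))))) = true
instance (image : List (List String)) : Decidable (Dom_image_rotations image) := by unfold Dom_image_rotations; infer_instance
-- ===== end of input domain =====

-- B builds every orientation directly from the original grid by a closed-form
-- index map instead of A's chained rotate/flip folding (objective: alternative).

-- ===== PORT A =====
def rotate_image (image : List (List String)) : List (List String) :=
  let size : Int := image.length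
  (PySem.List.pyRange 0 size).foldl (fun new_image row =>
    new_image ++ [(PySem.List.pyRange 0 size).foldl (fun s column =>
      s ++ [PySem.List.pyGetD (PySem.List.pyGetD image (size - 1 - column) []) row ""]) []]) []

def flip_image (image : List (List String)) : List (List String) :=
  image.map (fun row => (PySem.List.slice? row none none (-1)).getD [])

def image_rotations (image : List (List String)) : List (List (List String)) :=
  let st := (PySem.List.pyRange 0 2).foldl
    (fun (st : List (List (List String)) × List (List String)) _ =>
      let st2 := (PySem.List.pyRange 0 4).foldl
        (fun (st : List (List (List String)) × List (List String)) _ =>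
          (st.1 ++ [st.2], rotate_image st.2)) st
      (st2.1, flip_image st2.2)) ([], image)
  st.1

-- ===== PORT B =====
def grid_of (image : List (List String)) (f : Int → Int → Int × Int) : List (List String) :=
  let n : Int := image.length
  (PySem.List.pyRange 0 n).map (fun r =>
    (PySem.List.pyRange 0 n).map (fun c =>
      PySem.List.pyGetD (PySem.List.pyGetD image (f r c).1 []) (f r c).2 ""))

def image_rotations_alt (image : List (List String)) : List (List (List String)) :=
  let n : Int := image.length
  image :: ([fun r c => (n - 1 - c, r),
             fun r c => (n - 1 - r, n - 1 - c),
             fun r c => (c, n - 1 - r),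
             fun r c => (r, n - 1 - c),
             fun r c => (n - 1 - c, n - 1 - r),
             fun r c => (n - 1 - r, c),
             fun r c => (c, r)] : List (Int → Int → Int × Int)).map (grid_of image)

-- ===== PRECONDITION & SPEC =====
-- Pre_ excludes exactly the inputs on which Python A raises IndexError:
-- some of the first len(image) rows is shorter than len(image).
def Pre_image_rotations (image : List (List String)) : Prop :=
  ∀ row ∈ image, image.length ≤ row.length
instance (image : List (List String)) : Decidable (Pre_image_rotations image) := by
  unfold Pre_image_rotations; infer_instance

def pvWitness_image_rotations : List (List String) := [["a", "b"], ["c", "d"]]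

def Spec_image_rotations (image : List (List String)) (out : List (List (List String))) : Prop := out = image_rotations_alt image
instance (image : List (List String)) (out : List (List (List String))) : Decidable (Spec_image_rotations image out) := by unfold Spec_image_rotations; infer_instance

-- ===== CLAIM (what is proved, stated in full; the proofs are below) =====
def Claim_equal_image_rotations : Prop := ∀ (image : List (List String)), Dom_image_rotations image → Pre_image_rotations image → Spec_image_rotations image (image_rotations image)

-- ===== LEMMAS AND PROOFS =====

-- cell access image[i][j] with defaults, as both ports perform it
def pvCell (image : List (List String)) (i j : Int) : String :=
  PySem.List.pyGetD (PySem.List.pyGetD image i []) j ""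

-- an n×n grid given by a cell function
def pvMk (n : Nat) (g : Int → Int → String) : List (List String) :=
  (PySem.List.pyRange 0 (n : Int)).map (fun r =>
    (PySem.List.pyRange 0 (n : Int)).map (g r))

theorem pvMk_length (n : Nat) (g : Int → Int → String) : (pvMk n g).length = n := by
  simp [pvMk, PySem.List.length_pyRange_one]

theorem pvCell_mk (n : Nat) (g : Int → Int → String) {i j : Int}
    (h0 : 0 ≤ i) (h1 : i < n) (h2 : 0 ≤ j) (h3 : j < n) :
    pvCell (pvMk n g) i j = g i j := by
  unfold pvCell pvMk
  have hi : i = ((i.toNat : Nat) : Int) := by omega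
  have hj : j = ((j.toNat : Nat) : Int) := by omega
  rw [hi, hj,
    PySem.List.pyGetD_map_pyRange _ n i.toNat [] (by omega),
    PySem.List.pyGetD_map_pyRange _ n j.toNat "" (by omega)]

theorem pvMk_congr (n : Nat) (g g' : Int → Int → String)
    (h : ∀ r c : Int, 0 ≤ r → r < n → 0 ≤ c → c < n → g r c = g' r c) :
    pvMk n g = pvMk n g' := by
  apply List.map_congr_left
  intro r hr
  apply List.map_congr_left
  intro c hc
  rw [PySem.List.mem_pyRange_one] at hr hc
  exact h r c hr.1 hr.2 hc.1 hc.2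

theorem rotate_eq_mk (X : List (List String)) :
    rotate_image X = pvMk X.length (fun r c => pvCell X ((X.length : Int) - 1 - c) r) := by
  simp only [rotate_image, PySem.List.foldl_append_singleton_eq_map, List.nil_append, pvMk, pvCell]

theorem rotate_mk (n : Nat) (g : Int → Int → String) :
    rotate_image (pvMk n g) = pvMk n (fun r c => g ((n : Int) - 1 - c) r) := by
  rw [rotate_eq_mk, pvMk_length]
  apply pvMk_congr
  intro r c h0 h1 h2 h3
  exact pvCell_mk n g (by omega) (by omega) (by omega) (by omega)

theorem rev_pyRange (n : Nat) :
    (PySem.List.pyRange 0 (n : Int)).reverse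
      = (PySem.List.pyRange 0 (n : Int)).map (fun k => (n : Int) - 1 - k) := by
  apply List.ext_getElem
  · simp [PySem.List.length_pyRange_one]
  · intro k h1 h2
    simp only [List.getElem_reverse, List.getElem_map]
    rw [PySem.List.getElem_pyRange_one, PySem.List.getElem_pyRange_one]
    simp [PySem.List.length_pyRange_one] at h1 h2 ⊢
    omega

theorem flip_mk (n : Nat) (g : Int → Int → String) :
    flip_image (pvMk n g) = pvMk n (fun r c => g r ((n : Int) - 1 - c)) := by
  simp only [flip_image, pvMk, List.map_map, Function.comp_def,
    PySem.List.slice?_none_none_neg_one, Option.getD_some]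
  apply List.map_congr_left
  intro r _
  rw [← List.map_reverse, rev_pyRange, List.map_map]
  rfl

theorem grid_of_eq_mk (image : List (List String)) (f : Int → Int → Int × Int) :
    grid_of image f = pvMk image.length (fun r c => pvCell image (f r c).1 (f r c).2) := by
  simp only [grid_of, pvMk, pvCell]

-- ===== VERDICT (by name: the statement is the Claim_ definition above) =====
theorem image_rotations_spec : Claim_equal_image_rotations := by
  unfold Claim_equal_image_rotations
  intro image _ _
  unfold Spec_image_rotations
  have h2 : PySem.List.pyRange 0 2 = [0, 1] := by decide
  have h4 : PySem.List.pyRange 0 4 = [0, 1, 2, 3] := by decide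
  simp only [image_rotations, image_rotations_alt, h2, h4, List.foldl_cons,
    List.foldl_nil, List.map_cons, List.map_nil, List.nil_append, List.cons_append]
  rw [rotate_eq_mk image]
  simp only [rotate_mk, flip_mk, grid_of_eq_mk]
  simp only [List.cons.injEq, and_true, true_and]
  refine ⟨?_, ?_, ?_, ?_, ?_⟩ <;>
    · apply pvMk_congr
      intro r c h0 h1 h2 h3
      congr 1 <;> omega
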